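-- pv_equiv track=rewrite | github.com/chris263/DeepLearning | lstm_sat_coinbase.py | resolve_last_closed
-- ===== SOURCE A (Python) =====
-- from typing import List, Dict, Tuple, Optional
-- from typing import Optional, Tuple
-- from typing import Dict, Any, Optional, Tuple, List
--
-- TF_TO_MS = {
--     "1m": 60_000,
--     "3m": 180_000,
--     "5m": 300_000,
--     "15m": 900_000,
--     "30m": 1_800_000,
--     "1h": 3_600_000,
--     "2h": 7_200_000,
--     "4h": 14_400_000,
--     "6h": 21_600_000,
--     "8h": 28_800_000,
--     "12h": 43_200_000,
--     "1d": 86_400_000,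
-- }
--
-- def tf_ms(tf: str) -> int:
--     v = TF_TO_MS.get(str(tf).lower())
--     if not v:
--         raise SystemExit(f"Unsupported timeframe '{tf}' — add it to TF_TO_MS.")
--     return v
--
-- def resolve_last_closed(now_ms: int, last_bar_open_ms: int, timeframe: str) -> Tuple[Optional[int], str, Optional[int]]:
--     step = tf_ms(timeframe)
--     candidates = [(last_bar_open_ms + step, "close_stamp"), (last_bar_open_ms, "open_stamp")]
--     valid = [(c, tag, now_ms - c) for (c, tag) in candidates if now_ms >= c]
--     if not valid:
--         return None, "future", None
--     c, tag, age = min(valid, key=lambda x: x[2])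
--     return c, tag, age
-- ===== SOURCE B (Python) =====
-- TF_TO_MS = {
--     "1m": 60_000,
--     "3m": 180_000,
--     "5m": 300_000,
--     "15m": 900_000,
--     "30m": 1_800_000,
--     "1h": 3_600_000,
--     "2h": 7_200_000,
--     "4h": 14_400_000,
--     "6h": 21_600_000,
--     "8h": 28_800_000,
--     "12h": 43_200_000,
--     "1d": 86_400_000,
-- }
--
-- def tf_ms(tf: str) -> int:
--     v = TF_TO_MS.get(str(tf).lower())
--     if not v:
--         raise SystemExit(f"Unsupported timeframe '{tf}' — add it to TF_TO_MS.")
--     return v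
--
-- def resolve_last_closed(now_ms, last_bar_open_ms, timeframe):
--     step = tf_ms(timeframe)
--     close = last_bar_open_ms + step
--     if now_ms >= close:
--         return close, "close_stamp", now_ms - close
--     if now_ms >= last_bar_open_ms:
--         return last_bar_open_ms, "open_stamp", now_ms - last_bar_open_ms
--     return None, "future", None
-- ===== Notes on version B (the rewrite author's own statement) =====
-- stated objective: simpler
-- what changed: Replaces the candidates list, comprehension filter and min-by-age selection with a direct if/elif chain on the close and open timestamps (step is still computed first so bad timeframes exit identically).
import Mathlib
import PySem

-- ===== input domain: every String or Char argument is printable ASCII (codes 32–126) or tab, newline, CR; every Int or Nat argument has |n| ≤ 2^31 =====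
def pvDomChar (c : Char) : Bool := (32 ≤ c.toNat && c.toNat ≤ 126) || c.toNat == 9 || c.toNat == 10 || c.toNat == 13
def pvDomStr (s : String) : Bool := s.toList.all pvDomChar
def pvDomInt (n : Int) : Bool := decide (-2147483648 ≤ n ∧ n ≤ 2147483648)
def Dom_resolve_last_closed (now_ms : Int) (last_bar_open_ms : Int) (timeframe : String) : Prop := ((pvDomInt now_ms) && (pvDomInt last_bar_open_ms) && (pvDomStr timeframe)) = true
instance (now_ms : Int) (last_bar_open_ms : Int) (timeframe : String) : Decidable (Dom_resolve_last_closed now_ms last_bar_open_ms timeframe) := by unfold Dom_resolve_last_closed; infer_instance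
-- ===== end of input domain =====

-- B replaces A's candidates-list / comprehension-filter / min-by-age selection with a direct
-- if/elif chain (objective: simpler); return value only, no side effects involved.

-- ===== PORT A =====
def TF_TO_MS : PySem.Dict String Int := PySem.Dict.mk
  [("1m", 60000), ("3m", 180000), ("5m", 300000), ("15m", 900000),
   ("30m", 1800000), ("1h", 3600000), ("2h", 7200000), ("4h", 14400000),
   ("6h", 21600000), ("8h", 28800000), ("12h", 43200000), ("1d", 86400000)]

-- tf_ms: returns none exactly where the Python raises SystemExit ('not v' = missing key or value 0)
def tf_ms? (tf : String) : Option Int :=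
  match PySem.Dict.get? TF_TO_MS (PySem.Str.lower tf) with
  | none => none
  | some v => if v == 0 then none else some v

def resolve_last_closed (now_ms : Int) (last_bar_open_ms : Int) (timeframe : String) : Option Int × String × Option Int :=
  match tf_ms? timeframe with
  | none => (none, "", none)  -- SystemExit in Python; excluded by Pre_
  | some step =>
    let candidates : List (Int × String) := [(last_bar_open_ms + step, "close_stamp"), (last_bar_open_ms, "open_stamp")]
    let valid : List (Int × String × Int) :=
      (candidates.filter (fun ct => decide (now_ms ≥ ct.1))).map (fun ct => (ct.1, ct.2, now_ms - ct.1))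
    match PySem.List.min? valid (fun x => x.2.2) with   -- min(valid, key=λx. x[2]); none iff valid == []
    | none => (none, "future", none)
    | some (c, tag, age) => (some c, tag, some age)

-- ===== PORT B =====
def resolve_last_closed_alt (now_ms : Int) (last_bar_open_ms : Int) (timeframe : String) : Option Int × String × Option Int :=
  match tf_ms? timeframe with
  | none => (none, "", none)  -- SystemExit in Python; excluded by Pre_
  | some step =>
    let close := last_bar_open_ms + step
    if now_ms ≥ close then (some close, "close_stamp", some (now_ms - close))
    else if now_ms ≥ last_bar_open_ms then (some last_bar_open_ms, "open_stamp", some (now_ms - last_bar_open_ms))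
    else (none, "future", none)

-- ===== PRECONDITION & SPEC =====
-- Pre_ excludes exactly the timeframes not in TF_TO_MS (case-insensitively), on which A raises SystemExit.
def Pre_resolve_last_closed (now_ms : Int) (last_bar_open_ms : Int) (timeframe : String) : Prop :=
  (PySem.Dict.get? TF_TO_MS (PySem.Str.lower timeframe)).isSome = true
instance (now_ms : Int) (last_bar_open_ms : Int) (timeframe : String) : Decidable (Pre_resolve_last_closed now_ms last_bar_open_ms timeframe) := by unfold Pre_resolve_last_closed; infer_instance

def pvWitness_resolve_last_closed : Int × Int × String := (120000, 0, "1m")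

def Spec_resolve_last_closed (now_ms : Int) (last_bar_open_ms : Int) (timeframe : String) (out : Option Int × String × Option Int) : Prop := out = resolve_last_closed_alt now_ms last_bar_open_ms timeframe
instance (now_ms : Int) (last_bar_open_ms : Int) (timeframe : String) (out : Option Int × String × Option Int) : Decidable (Spec_resolve_last_closed now_ms last_bar_open_ms timeframe out) := by unfold Spec_resolve_last_closed; infer_instance

-- ===== CLAIM (what is proved, stated in full; the proofs are below) =====
def Claim_equal_resolve_last_closed : Prop := ∀ (now_ms : Int) (last_bar_open_ms : Int) (timeframe : String), Dom_resolve_last_closed now_ms last_bar_open_ms timeframe → Pre_resolve_last_closed now_ms last_bar_open_ms timeframe → Spec_resolve_last_closed now_ms last_bar_open_ms timeframe (resolve_last_closed now_ms last_bar_open_ms timeframe)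

-- ===== LEMMAS AND PROOFS =====

-- every value stored in TF_TO_MS is positive
set_option maxHeartbeats 2000000 in
lemma get?_TF_pos (k : String) (v : Int) (h : PySem.Dict.get? TF_TO_MS k = some v) : 0 < v := by
  unfold TF_TO_MS at h
  simp only [PySem.Dict.get?_mk_cons, beq_iff_eq] at h
  split_ifs at h
  all_goals first
    | (injection h with h; omega)
    | (simp [PySem.Dict.get?] at h)

lemma tf_ms?_pos (tf : String) (v : Int) (h : tf_ms? tf = some v) : 0 < v := by
  unfold tf_ms? at h
  cases hg : PySem.Dict.get? TF_TO_MS (PySem.Str.lower tf) with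
  | none => rw [hg] at h; exact absurd h (by simp)
  | some w =>
    rw [hg] at h
    have h' : (if (w == 0) = true then none else some w) = some v := h
    split at h'
    · exact absurd h' (by simp)
    · obtain rfl : w = v := by injection h'
      exact get?_TF_pos _ _ hg

-- ===== VERDICT (by name: the statement is the Claim_ definition above) =====
theorem resolve_last_closed_spec : Claim_equal_resolve_last_closed := by
  intro now_ms last_bar_open_ms timeframe _ _
  unfold Spec_resolve_last_closed resolve_last_closed resolve_last_closed_alt
  cases htf : tf_ms? timeframe with
  | none => rfl
  | some step =>
    have hpos : 0 < step := tf_ms?_pos _ _ htf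
    by_cases h1 : now_ms >= last_bar_open_ms + step
    · have h2 : now_ms >= last_bar_open_ms := by omega
      have hlt : ¬ (now_ms - last_bar_open_ms < now_ms - (last_bar_open_ms + step)) := by omega
      simp [h1, h2, PySem.List.min?, hlt]
    · by_cases h2 : now_ms >= last_bar_open_ms
      · simp [h1, h2, PySem.List.min?]
      · simp [h1, h2, PySem.List.min?]
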